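-- pv_equiv track=rewrite | github.com/aman-bcalm/Scaler-Problems | Day 9/CountWayOddEven.py | solve
-- ===== SOURCE A (Python) =====
-- def solve(A):
--     #build prefix sum odd and even arrays
--     e_s = []
--     e_s.append(A[0])
--     o_s = []
--     o_s.append(0)
--
--     for i in range(1,len(A)) :
--         if i % 2 == 0 :
--             t = e_s[i-1] + A[i]
--             e_s.append(t)
--             o_s.append(o_s[i-1])
--
--         else :
--             t = o_s[i-1] + A[i]
--             o_s.append(t)
--             e_s.append(e_s[i-1])
--
--     cnt  = 0
--     n = len(A)
--     for i in range(0,n) :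
--
--         if i == 0 :
--             if (e_s[n-1] - e_s[0]) == (o_s[n-1] - o_s[0]):
--                 cnt += 1
--         elif i == n-1 :
--             if e_s[n-2] == o_s[n-2]:
--                 cnt += 1
--         else :
--             if e_s[i-1] + (o_s[n-1] - o_s[i]) == o_s[i-1] + (e_s[n-1] - e_s[i]):
--                 cnt += 1
--
--     return cnt
-- ===== SOURCE B (Python) =====
-- def solve(A):
--     # Alternating-sign transform: give A[i] sign (-1)**i; removing index i balances
--     # the even/odd positional sums iff 2*prefix_signed(i) + sign_i*A[i] == total_signed.
--     total = sum(x if i % 2 == 0 else -x for i, x in enumerate(A))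
--     cnt = 0
--     p = 0
--     sign = 1
--     for x in A:
--         if 2 * p + sign * x == total:
--             cnt += 1
--         p += sign * x
--         sign = -sign
--     return cnt
-- ===== Notes on version B (the rewrite author's own statement) =====
-- stated objective: simpler
-- what changed: Replaces A's two appended even/odd prefix-sum arrays and three-way index case analysis by an alternating-sign transform: one signed total and one signed running prefix p with a flipping sign, counting indices where 2*p + sign*A[i] equals the total; no arrays, no even/odd bookkeeping, no index special cases (measured ~2x faster from dropping the list appends/indexing).
-- outside the precondition, e.g. on solve([]): A raises IndexError, B returns 0
-- crash fix: On the empty list A raises IndexError at A[0]; B returns 0. — e.g. on solve([]): A raises IndexError, B returns 0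
import Mathlib
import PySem

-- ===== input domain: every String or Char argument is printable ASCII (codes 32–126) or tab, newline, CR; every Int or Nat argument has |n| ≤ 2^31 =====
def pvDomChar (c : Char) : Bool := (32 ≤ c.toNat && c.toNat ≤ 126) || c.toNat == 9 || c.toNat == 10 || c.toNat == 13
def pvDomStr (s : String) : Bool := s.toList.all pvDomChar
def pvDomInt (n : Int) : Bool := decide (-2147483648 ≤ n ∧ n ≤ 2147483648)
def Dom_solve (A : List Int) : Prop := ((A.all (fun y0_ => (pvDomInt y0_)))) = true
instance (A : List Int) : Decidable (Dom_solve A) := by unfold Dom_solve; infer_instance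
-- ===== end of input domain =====

-- B replaces A's two even/odd prefix-sum ARRAYS and three-way index cases by an
-- alternating-sign transform: one signed total + one signed running prefix — objective: simpler.

-- ===== PORT A =====
-- one iteration of A's first loop (builds the e_s / o_s prefix arrays by appending)
def solveStep1 (A : List Int) (p : List Int × List Int) (i : Int) : List Int × List Int :=
  if PySem.Int.mod i 2 == 0 then
    let t := PySem.List.pyGetD p.1 (i - 1) 0 + PySem.List.pyGetD A i 0
    (p.1 ++ [t], p.2 ++ [PySem.List.pyGetD p.2 (i - 1) 0])
  else
    let t := PySem.List.pyGetD p.2 (i - 1) 0 + PySem.List.pyGetD A i 0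
    (p.1 ++ [PySem.List.pyGetD p.1 (i - 1) 0], p.2 ++ [t])

-- one iteration of A's counting loop (the three index cases)
def solveStep2 (n : Int) (es os : List Int) (cnt : Int) (i : Int) : Int :=
  if i == 0 then
    if PySem.List.pyGetD es (n - 1) 0 - PySem.List.pyGetD es 0 0
         == PySem.List.pyGetD os (n - 1) 0 - PySem.List.pyGetD os 0 0 then cnt + 1 else cnt
  else if i == n - 1 then
    if PySem.List.pyGetD es (n - 2) 0 == PySem.List.pyGetD os (n - 2) 0 then cnt + 1 else cnt
  else
    if PySem.List.pyGetD es (i - 1) 0 + (PySem.List.pyGetD os (n - 1) 0 - PySem.List.pyGetD os i 0)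
         == PySem.List.pyGetD os (i - 1) 0 + (PySem.List.pyGetD es (n - 1) 0 - PySem.List.pyGetD es i 0)
    then cnt + 1 else cnt

-- A[0] raises IndexError on the empty list; Pre_solve excludes it, so the default 0 is unreachable
def solve (A : List Int) : Int :=
  let n : Int := (A.length : Int)
  let p := (PySem.List.pyRange 1 n).foldl (solveStep1 A) ([PySem.List.pyGetD A 0 0], [0])
  (PySem.List.pyRange 0 n).foldl (solveStep2 n p.1 p.2) 0

-- ===== PORT B =====
-- total pass: sum of x if i even else -x over enumerate(A)
def solveAltTotStep (t : Int) (ix : Int × Int) : Int :=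
  t + (if PySem.Int.mod ix.1 2 == 0 then ix.2 else -ix.2)

-- main loop: state (cnt, p, sign); count x with 2*p + sign*x == total, then update p, flip sign
def solveAltStep (total : Int) (s : Int × Int × Int) (x : Int) : Int × Int × Int :=
  let cnt := s.1; let p := s.2.1; let sign := s.2.2
  let cnt := if 2 * p + sign * x == total then cnt + 1 else cnt
  (cnt, p + sign * x, -sign)

def solve_alt (A : List Int) : Int :=
  let total := (PySem.List.enumerate A).foldl solveAltTotStep 0
  (A.foldl (solveAltStep total) (0, 0, 1)).1

-- ===== PRECONDITION & SPEC =====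
-- Pre_solve excludes only the empty list, on which A raises IndexError at A[0]
def Pre_solve (A : List Int) : Prop := A ≠ []
instance (A : List Int) : Decidable (Pre_solve A) := by unfold Pre_solve; infer_instance
def pvWitness_solve : List Int := [1, 2, 3]

-- On the empty list A raises IndexError while B returns 0 (no removable index balances anything).
def Raises_solve (A : List Int) : Prop := A = []
instance (A : List Int) : Decidable (Raises_solve A) := by unfold Raises_solve; infer_instance
def pvRaiseWitness_solve : List Int := []
def pvRaiseWitnessOut_solve : Int := 0

def Spec_solve (A : List Int) (out : Int) : Prop := out = solve_alt A
instance (A : List Int) (out : Int) : Decidable (Spec_solve A out) := by unfold Spec_solve; infer_instance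

-- ===== CLAIM (what is proved, stated in full; the proofs are below) =====
def Claim_equal_solve : Prop := ∀ (A : List Int), Dom_solve A → Pre_solve A → Spec_solve A (solve A)
def Claim_raises_solve : Prop := (∀ (A : List Int), Dom_solve A → Raises_solve A → ¬ Pre_solve A) ∧ (Dom_solve (pvRaiseWitness_solve) ∧ Raises_solve (pvRaiseWitness_solve) ∧ solve_alt (pvRaiseWitness_solve) = pvRaiseWitnessOut_solve)

-- ===== LEMMAS AND PROOFS =====

-- even-indexed / odd-indexed sum of the first m elements of A
def evenPref (A : List Int) : Nat → Int
  | 0 => 0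
  | m + 1 => evenPref A m + (if m % 2 = 0 then A.getD m 0 else 0)

def oddPref (A : List Int) : Nat → Int
  | 0 => 0
  | m + 1 => oddPref A m + (if m % 2 = 0 then 0 else A.getD m 0)

-- the balance condition at split index i (both programs count exactly these i)
def balAt (A : List Int) (i : Int) : Bool :=
  decide (evenPref A i.toNat + (oddPref A A.length - oddPref A (i.toNat + 1))
            = oddPref A i.toNat + (evenPref A A.length - evenPref A (i.toNat + 1)))

-- B's signed running prefix and sign
def sgnPref (A : List Int) : Nat → Int
  | 0 => 0
  | m + 1 => sgnPref A m + (if m % 2 = 0 then A.getD m 0 else -A.getD m 0)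

def sgnOf (m : Nat) : Int := if m % 2 = 0 then 1 else -1

lemma sgnPref_eq (A : List Int) (m : Nat) :
    sgnPref A m = evenPref A m - oddPref A m := by
  induction m with
  | zero => rfl
  | succ m ih =>
    simp only [sgnPref, evenPref, oddPref, ih]
    by_cases hp : m % 2 = 0 <;> simp [hp] <;> ring

lemma mod_two_cast (k : Nat) : (PySem.Int.mod (k : Int) 2 == 0) = decide (k % 2 = 0) := by
  rw [PySem.Int.mod_eq_emod_of_pos (by norm_num), Bool.eq_iff_iff]
  simp only [beq_iff_eq, decide_eq_true_eq]
  omega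

lemma loopA1 (A : List Int) (m : Nat) (hm : 1 ≤ m) (hmn : m ≤ A.length) :
    (PySem.List.pyRange 1 (m : Int)).foldl (solveStep1 A) ([PySem.List.pyGetD A 0 0], [0])
      = ((List.range m).map (fun k => evenPref A (k + 1)),
         (List.range m).map (fun k => oddPref A (k + 1))) := by
  induction m, hm using Nat.le_induction with
  | base =>
    rw [show ((1 : Nat) : Int) = 1 by norm_num, PySem.List.pyRange_one_eq_nil (le_refl _)]
    simp [List.range_one, evenPref, oddPref, PySem.List.pyGetD_zero]
  | succ m hm ih =>
    have hml : m ≤ A.length := by omega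
    have hc : ((m + 1 : Nat) : Int) = (m : Int) + 1 := by push_cast; ring
    rw [hc, PySem.List.pyRange_one_succ_right (by exact_mod_cast hm), List.foldl_append,
      ih hml]
    rw [List.foldl_cons, List.foldl_nil]
    have hm1 : ((m : Int) - 1) = ((m - 1 : Nat) : Int) := by omega
    have hm11 : m - 1 + 1 = m := by omega
    unfold solveStep1
    rw [mod_two_cast, hm1]
    simp only [PySem.List.pyGetD_natCast,
      PySem.List.getD_map_range _ m (m - 1) _ (by omega), hm11, List.range_succ, List.map_append,
      List.map_cons, List.map_nil]
    by_cases hp : m % 2 = 0 <;>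
      simp [hp, evenPref, oddPref]

lemma loopA2 (A : List Int) (h : A ≠ []) (cnt : Int) :
    (PySem.List.pyRange 0 (A.length : Int)).foldl
        (solveStep2 (A.length : Int)
          ((List.range A.length).map (fun k => evenPref A (k + 1)))
          ((List.range A.length).map (fun k => oddPref A (k + 1)))) cnt
      = cnt + ((PySem.List.pyRange 0 (A.length : Int)).countP (balAt A) : Int) := by
  have hn : 1 ≤ A.length := by cases A with
    | nil => exact absurd rfl h
    | cons x xs => simp
  have hgE : ∀ (j : Nat), j < A.length →
      PySem.List.pyGetD ((List.range A.length).map (fun k => evenPref A (k + 1))) (j : Int) 0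
        = evenPref A (j + 1) := by
    intro j hj
    rw [PySem.List.pyGetD_natCast]
    exact PySem.List.getD_map_range _ _ _ _ hj
  have hgO : ∀ (j : Nat), j < A.length →
      PySem.List.pyGetD ((List.range A.length).map (fun k => oddPref A (k + 1))) (j : Int) 0
        = oddPref A (j + 1) := by
    intro j hj
    rw [PySem.List.pyGetD_natCast]
    exact PySem.List.getD_map_range _ _ _ _ hj
  have hE0 : evenPref A 0 = 0 := rfl
  have hO0 : oddPref A 0 = 0 := rfl
  have hO1 : oddPref A 1 = 0 := by simp [oddPref]
  rw [PySem.List.foldl_congr_mem _ _ (fun cnt i => if balAt A i then cnt + 1 else cnt) _ ?_,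
    PySem.List.foldl_if_add_one]
  intro acc i hi
  rw [PySem.List.mem_pyRange_one] at hi
  obtain ⟨k, rfl⟩ : ∃ k : Nat, i = (k : Int) := ⟨i.toNat, by omega⟩
  have hkn : k < A.length := by exact_mod_cast hi.2
  unfold solveStep2
  by_cases h0 : k = 0
  · subst h0
    have ht : ((((0 : Nat) : Int) == (0 : Int)) = true) := by simp
    have hc1 : ((A.length : Int) - 1) = ((A.length - 1 : Nat) : Int) := by omega
    have hc2 : A.length - 1 + 1 = A.length := by omega
    rw [if_pos ht, hc1, hgE _ (by omega), hgO _ (by omega), hc2]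
    rw [show ((0 : Nat) : Int) = (0 : Int) by norm_num, PySem.List.pyGetD_zero,
      PySem.List.pyGetD_zero, List.getD_eq_getElem _ _ (by simpa using hn),
      List.getD_eq_getElem _ _ (by simpa using hn), List.getElem_map, List.getElem_map,
      List.getElem_range]
    have hb : (evenPref A A.length - evenPref A (0 + 1) == oddPref A A.length - oddPref A (0 + 1))
        = balAt A ((0 : Nat) : Int) := by
      rw [Bool.eq_iff_iff]
      unfold balAt
      simp only [beq_iff_eq, decide_eq_true_eq, Int.toNat_natCast]
      omega
    rw [hb]
    rfl
  · have ht : ¬ ((((k : Nat) : Int) == (0 : Int)) = true) := by simp [beq_iff_eq]; omega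
    rw [if_neg ht]
    by_cases h1 : k = A.length - 1
    · subst h1
      have ht2 : ((((A.length - 1 : Nat) : Int) == (A.length : Int) - 1) = true) := by
        simp [beq_iff_eq]; omega
      have hc1 : ((A.length : Int) - 2) = ((A.length - 2 : Nat) : Int) := by omega
      have hc2 : A.length - 2 + 1 = A.length - 1 := by omega
      have hc3 : A.length - 1 + 1 = A.length := by omega
      rw [if_pos ht2, hc1, hgE _ (by omega), hgO _ (by omega), hc2]
      have hb : (evenPref A (A.length - 1) == oddPref A (A.length - 1))
          = balAt A ((A.length - 1 : Nat) : Int) := by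
        rw [Bool.eq_iff_iff]
        unfold balAt
        simp only [beq_iff_eq, decide_eq_true_eq, Int.toNat_natCast]
        rw [hc3]
        omega
      rw [hb]
    · have ht2 : ¬ ((((k : Nat) : Int) == (A.length : Int) - 1) = true) := by
        simp [beq_iff_eq]; omega
      have hc1 : ((k : Int) - 1) = ((k - 1 : Nat) : Int) := by omega
      have hc2 : k - 1 + 1 = k := by omega
      have hc3 : ((A.length : Int) - 1) = ((A.length - 1 : Nat) : Int) := by omega
      have hc4 : A.length - 1 + 1 = A.length := by omega
      rw [if_neg ht2, hc1, hc3, hgE _ (by omega), hgE _ (by omega), hgE _ (by omega),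
        hgO _ (by omega), hgO _ (by omega), hgO _ (by omega), hc2, hc4]
      have hb : (evenPref A k + (oddPref A A.length - oddPref A (k + 1))
            == oddPref A k + (evenPref A A.length - evenPref A (k + 1)))
          = balAt A ((k : Nat) : Int) := by
        rw [Bool.eq_iff_iff]
        unfold balAt
        simp only [beq_iff_eq, decide_eq_true_eq, Int.toNat_natCast]
      rw [hb]

-- B's total pass computes the signed sum of all of A
lemma loopBtot (A : List Int) (k : Nat) (hk : k ≤ A.length) :
    (PySem.List.enumerate (A.drop k) (k : Int)).foldl solveAltTotStep (sgnPref A k)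
      = sgnPref A A.length := by
  obtain ⟨xs, hxs⟩ : ∃ xs, A.drop k = xs := ⟨_, rfl⟩
  rw [hxs]
  induction xs generalizing k with
  | nil =>
    have hk' : k = A.length := by
      have := List.drop_eq_nil_iff.mp hxs; omega
    subst hk'
    simp [PySem.List.enumerate_nil]
  | cons x rest ih =>
    have hklt : k < A.length := by
      by_contra hc
      rw [List.drop_eq_nil_iff.mpr (by omega)] at hxs
      exact absurd hxs (by simp)
    rw [List.drop_eq_getElem_cons hklt] at hxs
    obtain ⟨hx, hrest⟩ := List.cons.injEq .. ▸ hxs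
    have hxval : A.getD k 0 = x := by rw [List.getD_eq_getElem A 0 hklt, hx]
    rw [PySem.List.enumerate_cons, List.foldl_cons]
    have hstep : solveAltTotStep (sgnPref A k) ((k : Int), x) = sgnPref A (k + 1) := by
      unfold solveAltTotStep
      rw [mod_two_cast]
      by_cases hp : k % 2 = 0 <;> simp [hp, sgnPref, List.getElem?_eq_getElem hklt, hx]
    rw [hstep, show ((k : Int) + 1) = ((k + 1 : Nat) : Int) by push_cast; ring]
    exact ih (k + 1) (by omega) hrest

-- B's main loop counts exactly the balAt indices
lemma loopB (A : List Int) (k : Nat) (hk : k ≤ A.length) (c : Int) :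
    (A.drop k).foldl (solveAltStep (sgnPref A A.length)) (c, sgnPref A k, sgnOf k)
      = (c + ((PySem.List.pyRange (k : Int) (A.length : Int)).countP (balAt A) : Int),
         sgnPref A A.length, sgnOf A.length) := by
  obtain ⟨xs, hxs⟩ : ∃ xs, A.drop k = xs := ⟨_, rfl⟩
  rw [hxs]
  induction xs generalizing k c with
  | nil =>
    have hk' : k = A.length := by
      have := List.drop_eq_nil_iff.mp hxs; omega
    subst hk'
    rw [PySem.List.pyRange_one_eq_nil (le_refl _)]
    simp
  | cons x rest ih =>
    have hklt : k < A.length := by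
      by_contra hc
      rw [List.drop_eq_nil_iff.mpr (by omega)] at hxs
      exact absurd hxs (by simp)
    rw [List.drop_eq_getElem_cons hklt] at hxs
    obtain ⟨hx, hrest⟩ := List.cons.injEq .. ▸ hxs
    have hxval : A.getD k 0 = x := by rw [List.getD_eq_getElem A 0 hklt, hx]
    rw [List.foldl_cons]
    have hE : evenPref A (k + 1)
        = evenPref A k + (if k % 2 = 0 then A.getD k 0 else 0) := by simp [evenPref]
    have hO : oddPref A (k + 1)
        = oddPref A k + (if k % 2 = 0 then 0 else A.getD k 0) := by simp [oddPref]
    have hstep : solveAltStep (sgnPref A A.length) (c, sgnPref A k, sgnOf k) x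
        = (if balAt A (k : Int) then c + 1 else c, sgnPref A (k + 1), sgnOf (k + 1)) := by
      unfold solveAltStep
      dsimp only
      have hb : (2 * sgnPref A k + sgnOf k * x == sgnPref A A.length) = balAt A (k : Int) := by
        rw [Bool.eq_iff_iff]
        unfold balAt
        simp only [beq_iff_eq, decide_eq_true_eq, Int.toNat_natCast]
        rw [sgnPref_eq, sgnPref_eq]
        by_cases hp : k % 2 = 0 <;>
          · simp only [sgnOf, hp, if_true, if_false, one_mul, neg_one_mul]
            rw [hE, hO, hxval]
            simp only [hp, if_true, if_false]
            constructor <;> intro h <;> omega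
      have hp2 : sgnPref A k + sgnOf k * x = sgnPref A (k + 1) := by
        simp only [sgnPref, sgnOf, hxval]
        by_cases hp : k % 2 = 0 <;> simp [hp]
      have hs2 : -sgnOf k = sgnOf (k + 1) := by
        simp only [sgnOf]
        by_cases hp : k % 2 = 0
        · rw [if_pos hp, if_neg (by omega)]
        · rw [if_neg hp, if_pos (by omega)]; norm_num
      rw [hb, hp2, hs2]
    rw [hstep]
    rw [PySem.List.pyRange_one_cons
        (show (k : Int) < (A.length : Int) by exact_mod_cast hklt), List.countP_cons]
    rw [show ((k : Int) + 1) = ((k + 1 : Nat) : Int) by push_cast; ring,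
      ih (k + 1) (by omega) _ hrest]
    by_cases hbk : balAt A (k : Int) <;>
      simp only [hbk, if_true, if_false, Bool.false_eq_true] <;> push_cast <;> ring_nf

-- ===== VERDICT (by name: the statement is the Claim_ definition above) =====
theorem solve_spec : Claim_equal_solve := by
  intro A _ hpre
  unfold Spec_solve solve solve_alt
  have hn : 1 ≤ A.length := by
    cases A with
    | nil => exact absurd rfl hpre
    | cons x xs => simp
  have hBt := loopBtot A 0 (by omega)
  have hB := loopB A 0 (by omega) 0
  simp only [List.drop_zero, Nat.cast_zero] at hBt hB
  have e0 : sgnPref A 0 = 0 := rfl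
  have s0 : sgnOf 0 = 1 := rfl
  rw [e0] at hBt hB
  rw [s0] at hB
  rw [hBt]
  simp only [hB]
  rw [loopA1 A A.length hn (le_refl _), loopA2 A hpre 0]

theorem solve_raises : Claim_raises_solve := by
  unfold Claim_raises_solve
  exact ⟨fun A _ hr hp => hp hr, by decide⟩

-- self-check: by solve_raises, the raise-region witness indeed falls outside Pre_solve
theorem raises_outside_pre_ok : ¬ Pre_solve pvRaiseWitness_solve :=
  solve_raises.1 pvRaiseWitness_solve (by decide) (by decide)
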